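-- pv_equiv track=rewrite | github.com/StakeSquid/dtop | log_view.py | next_search_match
-- ===== SOURCE A (Python) =====
-- def next_search_match(search_matches, current_match, line_positions, wrap_log_lines, w):
--     """Move to the next search match and return position to scroll to"""
--     if not search_matches:
--         return None
--
--     # Move to next match
--     new_match = (current_match + 1) % len(search_matches)
--
--     # Get the match details
--     line_idx, char_pos, _ = search_matches[new_match]
--
--     # Convert to pad position
--     if wrap_log_lines:
--         # Calculate wrapped line position
--         pad_line = line_positions[line_idx]
--         wrap_width = w - 3
--         while char_pos >= wrap_width:
--             pad_line += 1
--             char_pos -= wrap_width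
--     else:
--         # Just use the direct line position
--         pad_line = line_positions[line_idx]
--
--     # Return the match position and index
--     return {
--         'position': pad_line,
--         'match_index': new_match
--     }
-- ===== SOURCE B (Python) =====
-- def _pad_position(line_positions, line_idx, char_pos, wrap_log_lines, w):
--     """Pad row for a match: base line position, plus wrapped rows in closed form."""
--     base = line_positions[line_idx]
--     if not wrap_log_lines:
--         return base
--     rows, _ = divmod(char_pos, w - 3)
--     return base + rows
--
-- def next_search_match(search_matches, current_match, line_positions, wrap_log_lines, w):
--     """Move to the next search match and return position to scroll to"""
--     n = len(search_matches)
--     if n == 0: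
--         return None
--     new_match = (current_match + 1) % n
--     line_idx, char_pos, _ = search_matches[new_match]
--     return {
--         'position': _pad_position(line_positions, line_idx, char_pos, wrap_log_lines, w),
--         'match_index': new_match,
--     }
-- ===== Notes on version B (the rewrite author's own statement) =====
-- stated objective: simpler
-- what changed: The per-row subtract-until-below-width while loop is replaced by one closed-form divmod(char_pos, w-3), factored into a small pad-position helper.
-- outside the precondition, e.g. on next_search_match([(0, -1, 0)], 0, [9], True, 3): A returns {'position': 9, 'match_index': 0}, B raises
import Mathlib
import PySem

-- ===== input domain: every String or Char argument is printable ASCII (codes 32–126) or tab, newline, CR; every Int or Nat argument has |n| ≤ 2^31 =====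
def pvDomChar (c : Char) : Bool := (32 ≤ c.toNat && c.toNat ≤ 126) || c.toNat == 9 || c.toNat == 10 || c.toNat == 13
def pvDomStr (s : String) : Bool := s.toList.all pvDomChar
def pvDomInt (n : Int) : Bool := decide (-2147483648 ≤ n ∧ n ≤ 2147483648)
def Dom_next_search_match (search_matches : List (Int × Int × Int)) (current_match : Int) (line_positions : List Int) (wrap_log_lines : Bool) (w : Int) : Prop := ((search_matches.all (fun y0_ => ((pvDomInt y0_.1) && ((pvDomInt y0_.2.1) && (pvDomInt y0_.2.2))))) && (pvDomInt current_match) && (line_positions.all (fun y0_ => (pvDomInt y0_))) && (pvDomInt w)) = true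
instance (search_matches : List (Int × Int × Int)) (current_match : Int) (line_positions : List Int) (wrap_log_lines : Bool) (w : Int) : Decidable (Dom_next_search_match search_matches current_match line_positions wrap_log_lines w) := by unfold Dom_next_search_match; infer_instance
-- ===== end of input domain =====

-- B replaces A's per-row subtract loop with one closed-form divmod(char_pos, w-3),
-- factored into a pad-position helper; objective: simpler.

-- ===== PORT A =====
-- A's while loop with fuel making it total (fuel = char_pos.toNat + 1 suffices
-- whenever the Python loop terminates inside Pre_); state (pad_line, char_pos)
def nsmLoop : Nat → Int → Int → Int → (Int × Int)
  | 0, pad, cp, _ => (pad, cp)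
  | f + 1, pad, cp, ww => if cp ≥ ww then nsmLoop f (pad + 1) (cp - ww) ww else (pad, cp)

def next_search_match (search_matches : List (Int × Int × Int)) (current_match : Int) (line_positions : List Int) (wrap_log_lines : Bool) (w : Int) : Option (List (String × Int)) :=
  if search_matches.isEmpty then none
  else
    let new_match := PySem.Int.mod (current_match + 1) (search_matches.length : Int)
    -- search_matches[new_match]: index provably in range (Python's % of a nonempty len)
    let t := PySem.List.pyGetD search_matches new_match (0, 0, 0)
    match PySem.List.pyGet? line_positions t.1 with
    | none => none  -- IndexError (excluded by Pre_)
    | some base =>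
      if wrap_log_lines then
        let wrap_width := w - 3
        let res := nsmLoop (t.2.1.toNat + 1) base t.2.1 wrap_width
        some [("position", res.1), ("match_index", new_match)]
      else
        some [("position", base), ("match_index", new_match)]

-- ===== PORT B =====
-- Source B's helper _pad_position: line_positions[line_idx] lookup, then in the wrapped
-- case the first component of divmod(char_pos, w-3); none = IndexError/ZeroDivisionError
def padPosition (line_positions : List Int) (line_idx char_pos : Int) (wrap_log_lines : Bool) (w : Int) : Option Int :=
  (PySem.List.pyGet? line_positions line_idx).bind fun base =>
    if !wrap_log_lines then some base
    else (PySem.Int.divmod? char_pos (w - 3)).map fun rc => base + rc.1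

def next_search_match_alt (search_matches : List (Int × Int × Int)) (current_match : Int) (line_positions : List Int) (wrap_log_lines : Bool) (w : Int) : Option (List (String × Int)) :=
  match search_matches.length with
  | 0 => none
  | Nat.succ k =>
    let new_match := PySem.Int.mod (current_match + 1) ((k + 1 : Nat) : Int)
    (PySem.List.pyGet? search_matches new_match).bind fun t =>
      (padPosition line_positions t.1 t.2.1 wrap_log_lines w).map fun pad =>
        [("position", pad), ("match_index", new_match)]

-- ===== PRECONDITION & SPEC =====
-- Pre_ requires the selected match's line index to be a valid index (else A raises
-- IndexError) and, in the wrapped branch, a width w ≥ 4 (for w ≤ 3 A's subtract loop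
-- diverges whenever char_pos ≥ w-3, and B divides by w-3 which may be 0) and a
-- non-negative char_pos: negative character positions are outside the natural domain,
-- and A's leaving pad_line unchanged there is an artefact of the subtract-loop not running.
def Pre_next_search_match (search_matches : List (Int × Int × Int)) (current_match : Int) (line_positions : List Int) (wrap_log_lines : Bool) (w : Int) : Prop :=
  search_matches ≠ [] →
    let t := PySem.List.pyGetD search_matches (PySem.Int.mod (current_match + 1) (search_matches.length : Int)) (0, 0, 0)
    PySem.Raise.InRange line_positions.length t.1 ∧ (wrap_log_lines = true → 4 ≤ w ∧ 0 ≤ t.2.1)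
instance (search_matches : List (Int × Int × Int)) (current_match : Int) (line_positions : List Int) (wrap_log_lines : Bool) (w : Int) : Decidable (Pre_next_search_match search_matches current_match line_positions wrap_log_lines w) := by unfold Pre_next_search_match; infer_instance

def pvWitness_next_search_match : (List (Int × Int × Int)) × Int × List Int × Bool × Int := ([(0, 5, 0)], 0, [7], true, 10)

def Spec_next_search_match (search_matches : List (Int × Int × Int)) (current_match : Int) (line_positions : List Int) (wrap_log_lines : Bool) (w : Int) (out : Option (List (String × Int))) : Prop := out = next_search_match_alt search_matches current_match line_positions wrap_log_lines w
instance (search_matches : List (Int × Int × Int)) (current_match : Int) (line_positions : List Int) (wrap_log_lines : Bool) (w : Int) (out : Option (List (String × Int))) : Decidable (Spec_next_search_match search_matches current_match line_positions wrap_log_lines w out) := by unfold Spec_next_search_match; infer_instance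

-- ===== CLAIM (what is proved, stated in full; the proofs are below) =====
def Claim_equal_next_search_match : Prop := ∀ (search_matches : List (Int × Int × Int)) (current_match : Int) (line_positions : List Int) (wrap_log_lines : Bool) (w : Int), Dom_next_search_match search_matches current_match line_positions wrap_log_lines w → Pre_next_search_match search_matches current_match line_positions wrap_log_lines w → Spec_next_search_match search_matches current_match line_positions wrap_log_lines w (next_search_match search_matches current_match line_positions wrap_log_lines w)

-- ===== LEMMAS AND PROOFS =====

-- A's while loop performs exactly ⌊cp/ww⌋ iterations when 0 < ww and 0 ≤ cp
theorem nsmLoop_spec (f : Nat) (pad cp ww : Int) (hww : 0 < ww) (hcp : 0 ≤ cp)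
    (hf : cp < (f : Int)) : (nsmLoop f pad cp ww).1 = pad + PySem.Int.floordiv cp ww := by
  induction f generalizing pad cp with
  | zero => omega
  | succ f ih =>
    rw [nsmLoop]
    by_cases h : cp ≥ ww
    · simp only [if_pos h]
      rw [ih (pad + 1) (cp - ww) (by omega) (by push_cast at hf ⊢; omega)]
      rw [PySem.Int.floordiv_eq_ediv_of_pos hww, PySem.Int.floordiv_eq_ediv_of_pos hww]
      have h2 : (cp - ww) + 1 * ww = cp := by ring
      have h3 := Int.add_mul_ediv_right (cp - ww) 1 (by omega : ww ≠ 0)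
      rw [h2] at h3
      rw [h3]; ring
    · simp only [if_neg h]
      rw [PySem.Int.floordiv_eq_ediv_of_pos hww, Int.ediv_eq_zero_of_lt hcp (by omega)]
      ring

-- ===== VERDICT (by name: the statement is the Claim_ definition above) =====
theorem next_search_match_spec : Claim_equal_next_search_match := by
  intro sm cm lp wrap w _ hpre
  unfold Spec_next_search_match next_search_match next_search_match_alt padPosition
  cases hsm : sm with
  | nil => simp
  | cons x xs =>
    subst hsm
    have hne : (x :: xs) ≠ [] := by simp
    obtain ⟨hin, hwr⟩ := hpre hne
    simp only [List.length_cons, List.isEmpty_cons, Bool.false_eq_true, if_false] at hin hwr ⊢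
    set nm := PySem.Int.mod (cm + 1) ((xs.length + 1 : Nat) : Int) with hnm
    have hpos : (0 : Int) < ((xs.length + 1 : Nat) : Int) := by positivity
    have hnm0 : 0 ≤ nm := PySem.Int.mod_nonneg _ hpos
    have hnmlt : nm < ((x :: xs).length : Int) := by
      have h := PySem.Int.mod_lt (cm + 1) hpos
      rw [hnm]; simp only [List.length_cons]; push_cast at h ⊢; exact h
    rw [PySem.List.pyGet?_eq_some_getElem _ hnm0 hnmlt]
    have hget : PySem.List.pyGetD (x :: xs) nm (0, 0, 0) = (x :: xs)[nm.toNat] :=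
      PySem.List.pyGetD_eq_getElem _ _ hnm0 hnmlt
    rw [hget] at hin hwr ⊢
    simp only [Option.bind_some]
    set t := (x :: xs)[nm.toNat] with ht
    cases hlp : PySem.List.pyGet? lp t.1 with
    | none => exact absurd hin ((PySem.List.pyGet?_eq_none_iff _ _).1 hlp)
    | some base =>
      cases wrap with
      | false => simp
      | true =>
        obtain ⟨hw, hcp⟩ := hwr rfl
        simp only [Bool.not_true, Bool.false_eq_true, if_false, if_true]
        rw [PySem.Int.divmod?, if_neg (by omega : ¬ (w - 3 = 0))]
        simp only [Option.map_some, Option.bind_some]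
        rw [nsmLoop_spec _ _ _ _ (by omega) hcp (by omega)]
        simp [PySem.Int.floordiv]
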